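-- pv_equiv track=rewrite | github.com/MichiLunaa/workspace-html-css | FundamentosProgram/ejercicios py/guia 1 funciones/7.py | division_correo
-- ===== SOURCE A (Python) =====
-- def division_correo(correo):
--     antes = ""
--     despues = ""
--     encontrado = False
--
--     for letra in correo:
--         if letra == "@":
--             encontrado = True
--         elif not encontrado:
--             antes += letra
--         else:
--             despues += letra
--
--     return [antes, despues]
-- ===== SOURCE B (Python) =====
-- def division_correo(correo):
--     partes = correo.split("@")
--     return [partes[0], "".join(partes[1:])]
-- ===== Notes on version B (the rewrite author's own statement) =====
-- stated objective: faster
-- what changed: Replaces the character-by-character state-machine loop (flag + two repeatedly-concatenated string accumulators) with a single split on the separator followed by joining the remaining segments, reproducing A's dropping of every separator occurrence.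
import Mathlib
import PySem

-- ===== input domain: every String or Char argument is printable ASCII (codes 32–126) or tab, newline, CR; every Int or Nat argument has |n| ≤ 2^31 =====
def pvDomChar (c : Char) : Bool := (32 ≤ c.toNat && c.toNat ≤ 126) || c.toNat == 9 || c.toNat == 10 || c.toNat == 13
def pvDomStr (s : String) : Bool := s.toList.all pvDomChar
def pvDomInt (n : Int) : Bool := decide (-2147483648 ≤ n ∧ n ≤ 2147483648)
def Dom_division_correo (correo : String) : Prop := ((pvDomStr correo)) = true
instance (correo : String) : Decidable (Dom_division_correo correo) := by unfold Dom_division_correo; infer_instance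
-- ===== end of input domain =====

-- B replaces A's character-by-character state-machine loop with one split('@') plus a join of
-- the remaining segments (objective: idiomatic); same return value on every input, no side effects.

-- ===== PORT A =====
-- the loop body of A; string concatenation is accumulated as List Char
-- (Lean's own String append is kernel-opaque) and turned into a String at the end
def pasoA (st : List Char × List Char × Bool) (letra : Char) : List Char × List Char × Bool :=
  if letra = '@' then (st.1, st.2.1, true)
  else if !st.2.2 then (st.1 ++ [letra], st.2.1, st.2.2)
  else (st.1, st.2.1 ++ [letra], st.2.2)

def division_correo (correo : String) : List String :=
  let st := correo.toList.foldl pasoA ([], [], false)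
  [String.ofList st.1, String.ofList st.2.1]

-- ===== PORT B =====
-- partes = correo.split("@"); return [partes[0], "".join(partes[1:])]
def division_correo_alt (correo : String) : List String :=
  match PySem.Str.split? correo "@" with
  | some partes =>
      [(PySem.List.pyGet? partes 0).getD "",
       PySem.Str.join "" (PySem.List.slice partes (some 1) none)]
  | none => []  -- unreachable: split? is none only for an empty separator

-- ===== PRECONDITION & SPEC =====
def Spec_division_correo (correo : String) (out : List String) : Prop := out = division_correo_alt correo
instance (correo : String) (out : List String) : Decidable (Spec_division_correo correo out) := by unfold Spec_division_correo; infer_instance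

-- ===== CLAIM (what is proved, stated in full; the proofs are below) =====
def Claim_equal_division_correo : Prop := ∀ (correo : String), Dom_division_correo correo → Spec_division_correo correo (division_correo correo)

-- ===== LEMMAS AND PROOFS =====
-- recursive form of Python's split by the single-character separator '@'
def splitAux : List Char → List Char → List (List Char)
  | [], cur => [cur.reverse]
  | c :: rest, cur => if c = '@' then cur.reverse :: splitAux rest [] else splitAux rest (c :: cur)

lemma go_single (fuel : Nat) : ∀ (l cur : List Char) (accs : List (List Char)),
    l.length < fuel →
    PySem.Chars.splitOn.go ['@'] fuel l cur accs = accs.reverse ++ splitAux l cur := by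
  induction fuel with
  | zero => intro l cur accs h; omega
  | succ n ih =>
    intro l cur accs h
    cases l with
    | nil => simp [PySem.Chars.splitOn.go, splitAux]
    | cons c rest =>
      rw [PySem.Chars.splitOn.go]
      by_cases hc : c = '@'
      · subst hc
        simp only [List.isPrefixOf, List.length_cons] at *
        simp only [beq_self_eq_true, Bool.true_and, if_pos]
        simp only [List.length_nil, Nat.zero_add, List.drop_succ_cons, List.drop_zero]
        rw [ih _ _ _ (by omega)]
        simp [splitAux]
      · rw [show (['@'].isPrefixOf (c :: rest)) = false by
            simp [List.isPrefixOf]; exact fun h' => absurd h'.symm hc]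
        simp only [Bool.false_eq_true, if_false]
        rw [ih _ _ _ (by simp at h; omega)]
        simp only [splitAux, if_neg hc]

lemma splitOn_single (cs : List Char) :
    PySem.Chars.splitOn cs ['@'] = splitAux cs [] := by
  rw [PySem.Chars.splitOn, go_single _ _ _ _ (by omega)]; simp

lemma foldA_true : ∀ (cs : List Char) (a d : List Char),
    cs.foldl pasoA (a, d, true) = (a, d ++ cs.filter (· ≠ '@'), true) := by
  intro cs
  induction cs with
  | nil => simp
  | cons c rest ih =>
    intro a d
    by_cases hc : c = '@' <;> simp [pasoA, hc, ih]

lemma foldA_false : ∀ (cs : List Char) (a d : List Char),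
    cs.foldl pasoA (a, d, false) =
      (a ++ cs.takeWhile (· ≠ '@'),
       d ++ ((cs.dropWhile (· ≠ '@')).drop 1).filter (· ≠ '@'),
       cs.contains '@') := by
  intro cs
  induction cs with
  | nil => simp
  | cons c rest ih =>
    intro a d
    by_cases hc : c = '@'
    · simp [pasoA, hc, foldA_true]
    · simp [pasoA, hc, ih]
      exact fun h => absurd h.symm hc

lemma splitAux_flatten : ∀ (cs cur : List Char),
    (splitAux cs cur).flatten = cur.reverse ++ cs.filter (· ≠ '@') := by
  intro cs
  induction cs with
  | nil => simp [splitAux]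
  | cons c rest ih =>
    intro cur
    by_cases hc : c = '@' <;> simp [splitAux, hc, ih]

lemma splitAux_shape : ∀ (cs cur : List Char), ∃ ts,
    splitAux cs cur = (cur.reverse ++ cs.takeWhile (· ≠ '@')) :: ts ∧
    ts.flatten = ((cs.dropWhile (· ≠ '@')).drop 1).filter (· ≠ '@') := by
  intro cs
  induction cs with
  | nil => intro cur; exact ⟨[], by simp [splitAux]⟩
  | cons c rest ih =>
    intro cur
    by_cases hc : c = '@'
    · exact ⟨splitAux rest [], by simp [splitAux, hc, splitAux_flatten]⟩
    · obtain ⟨ts, h1, h2⟩ := ih (c :: cur)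
      exact ⟨ts, by simp [splitAux, hc, h1, h2]⟩

lemma intercalate_nil_char (ts : List (List Char)) : List.intercalate [] ts = ts.flatten := by
  induction ts with
  | nil => simp [List.intercalate]
  | cons t ts ih =>
    cases ts <;> simp_all [List.intercalate, List.intersperse]

lemma ports_agree (correo : String) : division_correo correo = division_correo_alt correo := by
  unfold division_correo division_correo_alt
  obtain ⟨ts, h1, h2⟩ := splitAux_shape correo.toList []
  rw [PySem.Str.split?]
  simp only [PySem.Chars.split?, show ("@" : String).toList = ['@'] from rfl,
    List.isEmpty_cons, if_false, splitOn_single, h1, Bool.false_eq_true]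
  rw [foldA_false]
  simp [PySem.List.pyGet?, PySem.List.pyIdx?, PySem.List.slice_from (a := 1) _ (by omega),
    PySem.Str.join, PySem.Chars.join, intercalate_nil_char,
    String.toList_ofList, ← List.drop_one]
  simp only [show (fun x => !decide (x = '@')) = (fun x : Char => decide (x ≠ '@')) by
      funext x; simp] at *
  rw [← h2]
  congr 1
  simp only [Function.comp_def, String.toList_ofList, List.map_id']

-- ===== VERDICT (by name: the statement is the Claim_ definition above) =====
theorem division_correo_spec : Claim_equal_division_correo := by
  intro correo _
  unfold Spec_division_correo
  exact ports_agree correo
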